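-- pv_equiv track=rewrite | github.com/abraunegg/onedrive | ci/e2e/framework/context.py | _extract_config_value
-- ===== SOURCE A (Python) =====
-- def _extract_config_value(config_text: str, key: str) -> str:
--     for raw_line in config_text.splitlines():
--         line = raw_line.strip()
--         if not line or line.startswith("#"):
--             continue
--         if "=" not in line:
--             continue
--
--         lhs, rhs = line.split("=", 1)
--         if lhs.strip() != key:
--             continue
--
--         value = rhs.strip()
--         if value.startswith('"') and value.endswith('"') and len(value) >= 2:
--             value = value[1:-1]
--         return value.strip()
--
--     return ""
-- ===== SOURCE B (Python) =====
-- def _extract_config_value(config_text: str, key: str) -> str: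
--     table = {}
--     for raw_line in config_text.splitlines():
--         line = raw_line.strip()
--         if not line or line.startswith("#") or "=" not in line:
--             continue
--         lhs, rhs = line.split("=", 1)
--         value = rhs.strip()
--         if value.startswith('"') and value.endswith('"') and len(value) >= 2:
--             value = value[1:-1]
--         table.setdefault(lhs.strip(), value.strip())
--     return table.get(key, "")
-- ===== Notes on version B (the rewrite author's own statement) =====
-- stated objective: idiomatic
-- what changed: Replaces A's scan-with-early-return by a single pass that builds a first-occurrence-wins dict of all parsed key/value entries and then looks the requested key up with get(key, '').
import Mathlib
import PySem

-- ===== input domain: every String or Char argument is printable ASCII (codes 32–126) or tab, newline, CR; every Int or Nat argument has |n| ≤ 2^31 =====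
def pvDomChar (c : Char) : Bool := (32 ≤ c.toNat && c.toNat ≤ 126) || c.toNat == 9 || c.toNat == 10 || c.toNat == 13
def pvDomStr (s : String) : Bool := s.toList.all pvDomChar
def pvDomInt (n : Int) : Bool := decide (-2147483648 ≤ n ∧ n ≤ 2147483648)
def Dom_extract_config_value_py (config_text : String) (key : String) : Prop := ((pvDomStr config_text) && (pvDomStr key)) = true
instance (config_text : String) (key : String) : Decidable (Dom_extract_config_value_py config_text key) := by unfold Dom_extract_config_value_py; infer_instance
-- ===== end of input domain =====

-- B builds a first-occurrence-wins dict over all config lines once, then looks the key up;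
-- A scans line by line and returns at the first matching key (same return value; objective: idiomatic).

-- ===== PORT A =====
-- A's scan loop with early return: recursion over the remaining lines.
def pvScanA (key : String) : List String → String
  | [] => ""
  | raw :: rest =>
    let line := PySem.Str.strip raw
    if (line == "") || PySem.Str.startswith line "#" then pvScanA key rest
    else if !(PySem.Str.isIn "=" line) then pvScanA key rest
    else
      let parts := (PySem.Str.splitMax? line "=" 1).getD []
      let lhs := parts.getD 0 ""
      let rhs := parts.getD 1 ""
      if PySem.Str.strip lhs != key then pvScanA key rest
      else
        let value := PySem.Str.strip rhs
        let value :=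
          if PySem.Str.startswith value "\"" && PySem.Str.endswith value "\"" &&
              decide (2 ≤ PySem.Str.len value)
          then PySem.Str.slice value (some 1) (some (-1)) else value
        PySem.Str.strip value

def extract_config_value_py (config_text : String) (key : String) : String :=
  pvScanA key (PySem.Str.splitlines config_text)

-- ===== PORT B =====
-- parse one raw line into an optional (key, processed value) entry
def pvParseEntry (raw : String) : Option (String × String) :=
  let line := PySem.Str.strip raw
  if (line == "") || PySem.Str.startswith line "#" || !(PySem.Str.isIn "=" line) then none
  else
    let parts := (PySem.Str.splitMax? line "=" 1).getD []
    let value := PySem.Str.strip (parts.getD 1 "")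
    let value :=
      if PySem.Str.startswith value "\"" && PySem.Str.endswith value "\"" &&
          decide (2 ≤ PySem.Str.len value)
      then PySem.Str.slice value (some 1) (some (-1)) else value
    some (PySem.Str.strip (parts.getD 0 ""), PySem.Str.strip value)

def extract_config_value_py_alt (config_text : String) (key : String) : String :=
  ((PySem.Str.splitlines config_text).foldl
      (fun d raw =>
        match pvParseEntry raw with
        | none => d
        | some kv => d.setdefault kv.1 kv.2)
      PySem.Dict.empty).getD key ""

-- ===== PRECONDITION & SPEC =====
def Spec_extract_config_value_py (config_text : String) (key : String) (out : String) : Prop := out = extract_config_value_py_alt config_text key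
instance (config_text : String) (key : String) (out : String) : Decidable (Spec_extract_config_value_py config_text key out) := by unfold Spec_extract_config_value_py; infer_instance

-- ===== CLAIM (what is proved, stated in full; the proofs are below) =====
def Claim_equal_extract_config_value_py : Prop := ∀ (config_text : String) (key : String), Dom_extract_config_value_py config_text key → Spec_extract_config_value_py config_text key (extract_config_value_py config_text key)

-- ===== LEMMAS AND PROOFS =====

-- A's one loop step, phrased through B's line parser
theorem pvScanA_cons (key raw : String) (rest : List String) :
    pvScanA key (raw :: rest) =
      match pvParseEntry raw with
      | none => pvScanA key rest
      | some kv => if kv.1 = key then kv.2 else pvScanA key rest := by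
  by_cases h1 : ((PySem.Str.strip raw == "") || PySem.Str.startswith (PySem.Str.strip raw) "#") = true
  · simp only [pvScanA, pvParseEntry, h1, Bool.true_or, if_true]
  · simp only [Bool.not_eq_true] at h1
    by_cases h3 : PySem.Str.isIn "=" (PySem.Str.strip raw) = true
    · simp only [pvScanA, pvParseEntry, h1, h3, Bool.not_true, Bool.or_false,
        if_false, Bool.false_eq_true]
      by_cases hk : PySem.Str.strip (((PySem.Str.splitMax? (PySem.Str.strip raw) "=" 1).getD []).getD 0 "") = key
      · simp only [hk, bne_self_eq_false, if_false, Bool.false_eq_true, if_true]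
      · have hb : ((PySem.Str.strip (((PySem.Str.splitMax? (PySem.Str.strip raw) "=" 1).getD []).getD 0 "")) != key) = true := by
          simp only [bne, Bool.not_eq_true', beq_eq_false_iff_ne, ne_eq]
          exact hk
        simp only [hb, if_true, if_neg hk]
    · simp only [Bool.not_eq_true] at h3
      simp only [pvScanA, pvParseEntry, h1, h3, Bool.not_false, Bool.or_true,
        if_true, Bool.false_eq_true, if_false]

-- loop invariant for B's dict-building fold
theorem pvFoldB (key : String) : ∀ (lines : List String) (d : PySem.Dict String String),
    (lines.foldl
        (fun d raw =>
          match pvParseEntry raw with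
          | none => d
          | some kv => d.setdefault kv.1 kv.2) d).getD key ""
      = match d.get? key with
        | some v => v
        | none => pvScanA key lines := by
  intro lines
  induction lines with
  | nil =>
    intro d
    cases h : d.get? key <;>
      simp [pvScanA, PySem.Dict.getD_eq_get?_getD, h]
  | cons raw rest ih =>
    intro d
    rw [List.foldl_cons]
    cases hp : pvParseEntry raw with
    | none =>
      simp only [hp]
      rw [ih, pvScanA_cons, hp]
    | some kv =>
      simp only [hp]
      rw [ih, pvScanA_cons, hp]
      by_cases hk : kv.1 = key
      · rw [hk, PySem.Dict.get?_setdefault_self]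
        cases h : d.get? key <;> simp [h, hk]
      · have hne : key ≠ kv.1 := fun h => hk (Eq.symm h)
        rw [PySem.Dict.get?_setdefault_of_ne d kv.2 hne]
        cases h : d.get? key <;> simp [h, hk]

-- ===== VERDICT (by name: the statement is the Claim_ definition above) =====
theorem extract_config_value_py_spec : Claim_equal_extract_config_value_py := by
  intro config_text key _
  unfold Spec_extract_config_value_py extract_config_value_py extract_config_value_py_alt
  rw [pvFoldB]
  simp [PySem.Dict.get?_empty]
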